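-- pv_equiv track=rewrite | github.com/hmk252/ARC-9th-place | src/arc_2020_ensemble_26_solutions.py | VertSym_Eq
-- ===== SOURCE A (Python) =====
-- def VertSym_Eq(x, Param):
--     n = len(x)
--     k = len(x[0])
--
--     s = Param
--     Ans = []
--
--     for i in range(n):
--         for j in range(k):
--             j1 = s - j
--             if j1 < 0 or j1 >= k:
--                 continue
--             a = (i, j)
--             b = (i, j1)
--             if [a, b] in Ans or [b, a] in Ans or a == b:
--                 continue
--             Ans.append([a, b])
--     return Ans
-- ===== SOURCE B (Python) =====
-- def VertSym_Eq(x, Param):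
--     k = len(x[0])
--     return [
--         [(i, j), (i, Param - j)]
--         for i in range(len(x))
--         for j in range(k)
--         if 0 <= Param - j < k and 2 * j < Param
--     ]
-- ===== Notes on version B (the rewrite author's own statement) =====
-- stated objective: simpler
-- what changed: Replaced A's accumulated Ans list with its membership scans (both orders) and self-pair test by a flat comprehension that emits each symmetric pair exactly once by construction, keeping j only when 0 <= Param-j < k and 2*j < Param.
import Mathlib
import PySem

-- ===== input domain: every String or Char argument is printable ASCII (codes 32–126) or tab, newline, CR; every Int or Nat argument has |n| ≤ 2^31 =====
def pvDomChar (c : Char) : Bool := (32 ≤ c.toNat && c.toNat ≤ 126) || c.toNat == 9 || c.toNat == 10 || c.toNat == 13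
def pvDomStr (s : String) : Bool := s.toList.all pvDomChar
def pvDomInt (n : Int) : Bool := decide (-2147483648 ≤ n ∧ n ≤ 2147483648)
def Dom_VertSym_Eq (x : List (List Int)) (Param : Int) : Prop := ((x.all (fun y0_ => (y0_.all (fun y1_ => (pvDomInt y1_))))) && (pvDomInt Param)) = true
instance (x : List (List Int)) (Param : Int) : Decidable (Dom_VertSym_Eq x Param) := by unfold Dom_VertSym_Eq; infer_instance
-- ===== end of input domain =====

-- B drops A's maintained dedup list (membership scans over Ans) and emits each
-- symmetric pair directly, keeping j only when 2*j < Param, so each pair appears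
-- exactly once by construction. Objective: simpler.

-- ===== PORT A =====
-- A: builds Ans, appending [a,b] unless already present in either order or a = b.
def VertSym_Eq (x : List (List Int)) (Param : Int) : List (List (Int × Int)) :=
  let n := x.length
  -- x[0]: Python raises IndexError on empty x (excluded by Pre_); getD makes the port total
  let k := ((PySem.List.pyGet? x 0).getD []).length
  let s := Param
  (List.range n).foldl (fun (Ans : List (List (Int × Int))) (i : Nat) =>
    (List.range k).foldl (fun (Ans : List (List (Int × Int))) (j : Nat) =>
      let j1 := s - (j : Int)
      if j1 < 0 ∨ (k : Int) ≤ j1 then Ans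
      else
        let a := ((i : Int), (j : Int))
        let b := ((i : Int), j1)
        if [a, b] ∈ Ans ∨ [b, a] ∈ Ans ∨ a = b then Ans
        else Ans ++ [[a, b]]) Ans) []

-- ===== PORT B =====
-- B: flat comprehension, pair kept iff 0 ≤ Param-j < k and 2*j < Param.
def VertSym_Eq_alt (x : List (List Int)) (Param : Int) : List (List (Int × Int)) :=
  let k := ((PySem.List.pyGet? x 0).getD []).length
  (List.range x.length).flatMap (fun (i : Nat) =>
    (List.range k).filterMap (fun (j : Nat) =>
      if 0 ≤ Param - (j : Int) ∧ Param - (j : Int) < (k : Int) ∧ 2 * (j : Int) < Param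
      then some [((i : Int), (j : Int)), ((i : Int), Param - (j : Int))]
      else none))

-- ===== PRECONDITION & SPEC =====
-- Pre_ excludes only x = [], where Python A raises IndexError on x[0].
def Pre_VertSym_Eq (x : List (List Int)) (Param : Int) : Prop := x ≠ []
instance (x : List (List Int)) (Param : Int) : Decidable (Pre_VertSym_Eq x Param) := by unfold Pre_VertSym_Eq; infer_instance
def pvWitness_VertSym_Eq : List (List Int) × Int := ([[1, 2, 3], [4, 5, 6]], 2)

def Spec_VertSym_Eq (x : List (List Int)) (Param : Int) (out : List (List (Int × Int))) : Prop := out = VertSym_Eq_alt x Param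
instance (x : List (List Int)) (Param : Int) (out : List (List (Int × Int))) : Decidable (Spec_VertSym_Eq x Param out) := by unfold Spec_VertSym_Eq; infer_instance

-- ===== CLAIM (what is proved, stated in full; the proofs are below) =====
def Claim_equal_VertSym_Eq : Prop := ∀ (x : List (List Int)) (Param : Int), Dom_VertSym_Eq x Param → Pre_VertSym_Eq x Param → Spec_VertSym_Eq x Param (VertSym_Eq x Param)

-- ===== LEMMAS AND PROOFS =====

-- A's inner and outer loop bodies, named (definitionally equal to the lambdas in the port)
def pvBodyJ (k : Nat) (s : Int) (i : Nat) (Ans : List (List (Int × Int))) (j : Nat) : List (List (Int × Int)) :=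
  let j1 := s - (j : Int)
  if j1 < 0 ∨ (k : Int) ≤ j1 then Ans
  else
    let a := ((i : Int), (j : Int))
    let b := ((i : Int), j1)
    if [a, b] ∈ Ans ∨ [b, a] ∈ Ans ∨ a = b then Ans
    else Ans ++ [[a, b]]

def pvBodyI (k : Nat) (s : Int) (Ans : List (List (Int × Int))) (i : Nat) : List (List (Int × Int)) :=
  (List.range k).foldl (pvBodyJ k s i) Ans

-- the filter function of B's row i
def pvF (k : Nat) (s : Int) (i j : Nat) : Option (List (Int × Int)) :=
  if 0 ≤ s - (j : Int) ∧ s - (j : Int) < (k : Int) ∧ 2 * (j : Int) < s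
  then some [((i : Int), (j : Int)), ((i : Int), s - (j : Int))]
  else none

-- pairs emitted by row i after the first t inner iterations
def pvEmit (k : Nat) (s : Int) (i t : Nat) : List (List (Int × Int)) :=
  (List.range t).filterMap (pvF k s i)

-- all rows < t, completed
def pvFlat (k : Nat) (s : Int) (t : Nat) : List (List (Int × Int)) :=
  (List.range t).flatMap (fun i => pvEmit k s i k)

theorem pvEmit_succ (k : Nat) (s : Int) (i t : Nat) :
    pvEmit k s i (t + 1) = pvEmit k s i t ++ (pvF k s i t).toList := by
  rw [pvEmit, List.range_succ, List.filterMap_append]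
  cases h : pvF k s i t <;> simp [h, pvEmit]

theorem mem_pvEmit (k : Nat) (s : Int) (i t : Nat) (e : List (Int × Int)) :
    e ∈ pvEmit k s i t ↔ ∃ x, x < t ∧ (0 ≤ s - (x : Int) ∧ s - (x : Int) < (k : Int) ∧ 2 * (x : Int) < s) ∧
      e = [((i : Int), (x : Int)), ((i : Int), s - (x : Int))] := by
  simp only [pvEmit, List.mem_filterMap, List.mem_range]
  constructor
  · rintro ⟨x, hx, hfx⟩
    rw [pvF] at hfx
    split at hfx
    · exact ⟨x, hx, by assumption, by simpa using hfx.symm⟩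
    · simp at hfx
  · rintro ⟨x, hx, hc, he⟩
    exact ⟨x, hx, by rw [pvF, if_pos hc, he]⟩

-- one inner step: iteration j = t turns P ++ pvEmit t into P ++ pvEmit (t+1)
theorem pv_step (k : Nat) (s : Int) (i t : Nat) (ht : t < k)
    (P : List (List (Int × Int))) (hP : ∀ e ∈ P, ∀ p ∈ e, p.1 ≠ (i : Int)) :
    pvBodyJ k s i (P ++ pvEmit k s i t) t = P ++ pvEmit k s i (t + 1) := by
  rw [pvBodyJ]
  by_cases hrange : s - (t : Int) < 0 ∨ (k : Int) ≤ s - (t : Int)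
  · simp only [hrange, if_true]
    rw [pvEmit_succ]
    have h : pvF k s i t = none := by rw [pvF, if_neg]; omega
    simp [h]
  · push Not at hrange
    obtain ⟨h0, hk⟩ := hrange
    simp only
    rw [if_neg (by push Not; omega)]
    by_cases h2 : 2 * (t : Int) < s
    · -- fresh pair: all three tests false, appended; pvF t = some [a,b]
      have hm1 : [((i : Int), (t : Int)), ((i : Int), s - (t : Int))] ∉ P ++ pvEmit k s i t := by
        intro hmem
        rcases List.mem_append.1 hmem with h | h
        · exact hP _ h ((i : Int), (t : Int)) (by simp) rfl
        · obtain ⟨x, hx, _, he⟩ := (mem_pvEmit k s i t _).1 h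
          simp only [List.cons.injEq, Prod.mk.injEq, and_true] at he
          omega
      have hm2 : [((i : Int), s - (t : Int)), ((i : Int), (t : Int))] ∉ P ++ pvEmit k s i t := by
        intro hmem
        rcases List.mem_append.1 hmem with h | h
        · exact hP _ h ((i : Int), s - (t : Int)) (by simp) rfl
        · obtain ⟨x, hx, _, he⟩ := (mem_pvEmit k s i t _).1 h
          simp only [List.cons.injEq, Prod.mk.injEq, and_true] at he
          omega
      have hne : ((i : Int), (t : Int)) ≠ ((i : Int), s - (t : Int)) := by
        intro h; rw [Prod.mk.injEq] at h; omega
      rw [if_neg (by simp [hm1, hm2, hne])]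
      rw [pvEmit_succ]
      have h : pvF k s i t = some [((i : Int), (t : Int)), ((i : Int), s - (t : Int))] := by
        rw [pvF, if_pos ⟨h0, hk, h2⟩]
      simp [h]
    · -- 2t ≥ s: either a = b (2t = s) or the mirrored pair was already emitted (2t > s)
      have hskip : [((i : Int), (t : Int)), ((i : Int), s - (t : Int))] ∈ P ++ pvEmit k s i t ∨
          [((i : Int), s - (t : Int)), ((i : Int), (t : Int))] ∈ P ++ pvEmit k s i t ∨
          ((i : Int), (t : Int)) = ((i : Int), s - (t : Int)) := by
        by_cases heq : 2 * (t : Int) = s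
        · right; right; rw [Prod.mk.injEq]; constructor <;> omega
        · right; left
          apply List.mem_append.2
          right
          apply (mem_pvEmit k s i t _).2
          refine ⟨(s - (t : Int)).toNat, by omega, ⟨by omega, by omega, by omega⟩, ?_⟩
          have hcast : (((s - (t : Int)).toNat : Nat) : Int) = s - (t : Int) := by omega
          rw [hcast]
          have h3 : s - (s - (t : Int)) = (t : Int) := by omega
          rw [h3]
      rw [if_pos hskip]
      rw [pvEmit_succ]
      have h : pvF k s i t = none := by rw [pvF, if_neg]; omega
      simp [h]

-- inner loop: starting from P ++ pvEmit t, the iterations t..t+m-1 extend it to P ++ pvEmit (t+m)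
theorem pv_inner (k : Nat) (s : Int) (i : Nat) :
    ∀ (m t : Nat), t + m ≤ k →
    ∀ (P : List (List (Int × Int))), (∀ e ∈ P, ∀ p ∈ e, p.1 ≠ (i : Int)) →
    List.foldl (pvBodyJ k s i) (P ++ pvEmit k s i t) (List.range' t m)
    = P ++ pvEmit k s i (t + m) := by
  intro m
  induction m with
  | zero => intro t _ P _; simp
  | succ m ih =>
    intro t htm P hP
    have hs := pv_step k s i t (by omega) P hP
    rw [List.range'_succ, List.foldl_cons, hs,
      ih (t + 1) (by omega) P hP,
      show t + 1 + m = t + (m + 1) from by omega]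

theorem pvFlat_row_ne (k : Nat) (s : Int) (t : Nat) :
    ∀ e ∈ pvFlat k s t, ∀ p ∈ e, p.1 ≠ (t : Int) := by
  intro e he p hp
  simp only [pvFlat, List.mem_flatMap, List.mem_range] at he
  obtain ⟨i, hi, hei⟩ := he
  obtain ⟨x, _, _, rfl⟩ := (mem_pvEmit k s i k e).1 hei
  simp only [List.mem_cons, List.not_mem_nil, or_false] at hp
  rcases hp with rfl | rfl <;> simp <;> omega

-- outer loop: rows t..t+m-1 extend pvFlat t to pvFlat (t+m)
theorem pv_outer (k : Nat) (s : Int) :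
    ∀ (m t : Nat),
    List.foldl (pvBodyI k s) (pvFlat k s t) (List.range' t m) = pvFlat k s (t + m) := by
  intro m
  induction m with
  | zero => intro t; simp
  | succ m ih =>
    intro t
    rw [List.range'_succ, List.foldl_cons]
    have hrow : pvBodyI k s (pvFlat k s t) t = pvFlat k s (t + 1) := by
      rw [pvBodyI]
      have h0 : pvFlat k s t = pvFlat k s t ++ pvEmit k s t 0 := by simp [pvEmit]
      rw [List.range_eq_range', h0,
        pv_inner k s t k 0 (by omega) (pvFlat k s t) (pvFlat_row_ne k s t)]
      simp [pvFlat, List.range_succ]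
    rw [hrow, ih (t + 1), show t + 1 + m = t + (m + 1) from by omega]

-- ===== VERDICT (by name: the statement is the Claim_ definition above) =====
theorem VertSym_Eq_spec : Claim_equal_VertSym_Eq := by
  intro x Param _ _
  unfold Spec_VertSym_Eq
  have hA : VertSym_Eq x Param
      = List.foldl (pvBodyI ((PySem.List.pyGet? x 0).getD []).length Param) [] (List.range x.length) := rfl
  have hB : VertSym_Eq_alt x Param
      = pvFlat ((PySem.List.pyGet? x 0).getD []).length Param x.length := rfl
  rw [hA, hB, List.range_eq_range']
  have h0 : ([] : List (List (Int × Int))) = pvFlat ((PySem.List.pyGet? x 0).getD []).length Param 0 := by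
    simp [pvFlat]
  rw [h0, pv_outer ((PySem.List.pyGet? x 0).getD []).length Param x.length 0, Nat.zero_add]
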